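-- pv_equiv track=rewrite | github.com/GJKarthik/sap-oss-v1 | src/training/hippocpp/mangle/tests/validate_rules.py | check_zig_coverage
-- ===== SOURCE A (Python) =====
-- ZIG_MODULES = [
--     "storage", "catalog", "buffer_manager", "transaction",
--     "parser", "planner", "processor", "optimizer",
--     "common", "graph", "index", "expression",
-- ]
--
-- def check_zig_coverage(all_decls: dict[str, set[str]]) -> dict[str, bool]:
--     """Check which Zig modules have Mangle rule coverage."""
--     all_names = set()
--     for decls in all_decls.values():
--         all_names |= decls
--
--     coverage = {}
--     for mod in ZIG_MODULES:
--         has_coverage = any(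
--             mod in name or mod.replace("_", "") in name
--             for name in all_names
--         )
--         coverage[mod] = has_coverage
--     return coverage
-- ===== SOURCE B (Python) =====
-- ZIG_MODULES = [
--     "storage", "catalog", "buffer_manager", "transaction",
--     "parser", "planner", "processor", "optimizer",
--     "common", "graph", "index", "expression",
-- ]
--
-- def _hit(mod: str, name: str) -> bool:
--     return mod in name or mod.replace("_", "") in name
--
-- def check_zig_coverage(all_decls: dict[str, set[str]]) -> dict[str, bool]:
--     """Check which Zig modules have Mangle rule coverage."""
--     coverage = {mod: False for mod in ZIG_MODULES}
--     names = [name for decls in all_decls.values() for name in decls]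
--     for name in names:
--         if all(coverage.values()):
--             break
--         for mod, done in coverage.items():
--             if not done and _hit(mod, name):
--                 coverage[mod] = True
--     return coverage
-- ===== Notes on version B (the rewrite author's own statement) =====
-- stated objective: alternative
-- what changed: Loop interchange with different maintained state: instead of scanning the whole name set once per module, B initializes a coverage dict of False flags, makes one pass over the declaration names flipping still-False module flags, and breaks out early once every module is covered.
import Mathlib
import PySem

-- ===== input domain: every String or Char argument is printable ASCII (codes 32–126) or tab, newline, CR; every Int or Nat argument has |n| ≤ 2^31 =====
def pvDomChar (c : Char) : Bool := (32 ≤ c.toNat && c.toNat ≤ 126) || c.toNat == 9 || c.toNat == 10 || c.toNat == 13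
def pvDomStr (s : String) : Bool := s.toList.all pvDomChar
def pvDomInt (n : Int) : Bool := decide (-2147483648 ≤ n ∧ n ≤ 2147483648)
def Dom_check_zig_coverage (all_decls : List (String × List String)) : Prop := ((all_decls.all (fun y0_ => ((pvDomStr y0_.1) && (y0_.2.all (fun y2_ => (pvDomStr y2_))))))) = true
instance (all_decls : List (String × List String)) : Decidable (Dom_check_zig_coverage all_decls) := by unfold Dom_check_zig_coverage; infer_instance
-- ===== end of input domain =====

-- B replaces A's per-module scan of the whole name set by one name-major pass over a dict of
-- False flags with an early exit once every module is covered (alternative decomposition, same result).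

def ZIG_MODULES : List String :=
  ["storage", "catalog", "buffer_manager", "transaction",
   "parser", "planner", "processor", "optimizer",
   "common", "graph", "index", "expression"]

-- 'mod in name or mod.replace("_", "") in name' (identical subexpression in both Pythons)
def modHit (mod name : String) : Bool :=
  PySem.Str.isIn mod name || PySem.Str.isIn (PySem.Str.replace mod "_" "") name

-- the dict parameter: build the Python dict the caller passes (duplicate keys overwrite in place)
def declsDict (all_decls : List (String × List String)) : PySem.Dict String (List String) :=
  all_decls.foldl (fun acc kv => acc.insert kv.1 kv.2) PySem.Dict.empty

-- ===== PORT A =====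
def check_zig_coverage (all_decls : List (String × List String)) : List (String × Bool) :=
  let all_names : PySem.Set String :=
    (declsDict all_decls).values.foldl (fun s decls => PySem.Set.union s decls) PySem.Set.empty
  let coverage : PySem.Dict String Bool :=
    ZIG_MODULES.foldl (fun cov mod =>
      cov.insert mod (all_names.any (fun name => modHit mod name))) PySem.Dict.empty
  coverage.items

-- ===== PORT B =====
-- inner 'for mod, done in coverage.items(): if not done and _hit(...): coverage[mod] = True'
def bStep (name : String) (cov : List (String × Bool)) : List (String × Bool) :=
  cov.map (fun p => if p.2 then p else (p.1, modHit p.1 name))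

-- 'for name in names: if all(coverage.values()): break; <inner loop>'
def bLoop : List String → List (String × Bool) → List (String × Bool)
  | [], cov => cov
  | name :: rest, cov =>
      if cov.all (fun p => p.2) then cov
      else bLoop rest (bStep name cov)

def check_zig_coverage_alt (all_decls : List (String × List String)) : List (String × Bool) :=
  let names : List String := (declsDict all_decls).values.flatMap (fun decls => decls)
  bLoop names (ZIG_MODULES.map (fun mod => (mod, false)))

-- ===== PRECONDITION & SPEC =====
def Spec_check_zig_coverage (all_decls : List (String × List String)) (out : List (String × Bool)) : Prop := out = check_zig_coverage_alt all_decls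
instance (all_decls : List (String × List String)) (out : List (String × Bool)) : Decidable (Spec_check_zig_coverage all_decls out) := by unfold Spec_check_zig_coverage; infer_instance

-- ===== CLAIM (what is proved, stated in full; the proofs are below) =====
def Claim_equal_check_zig_coverage : Prop := ∀ (all_decls : List (String × List String)), Dom_check_zig_coverage all_decls → Spec_check_zig_coverage all_decls (check_zig_coverage all_decls)

-- ===== LEMMAS AND PROOFS =====

-- membership in the running union A builds
lemma mem_foldl_union (vs : List (List String)) (s : PySem.Set String) (x : String) :
    x ∈ vs.foldl (fun s decls => PySem.Set.union s decls) s ↔ x ∈ s ∨ x ∈ vs.flatMap (fun d => d) := by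
  induction vs generalizing s with
  | nil => simp
  | cons v rest ih =>
      simp only [List.foldl_cons, List.flatMap_cons, ih, PySem.Set.mem_union, List.mem_append]
      tauto

lemma any_eq_of_mem_iff {l₁ l₂ : List String} (h : ∀ x, x ∈ l₁ ↔ x ∈ l₂) (p : String → Bool) :
    l₁.any p = l₂.any p := by
  apply Bool.eq_iff_iff.mpr
  simp only [List.any_eq_true]
  constructor
  · rintro ⟨x, hx, hp⟩; exact ⟨x, (h x).mp hx, hp⟩
  · rintro ⟨x, hx, hp⟩; exact ⟨x, (h x).mpr hx, hp⟩

-- closed form of B's loop (the early exit returns the same value: all flags are already true)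
lemma bLoop_eq (names : List String) (cov : List (String × Bool)) :
    bLoop names cov = cov.map (fun p => (p.1, p.2 || names.any (fun n => modHit p.1 n))) := by
  induction names generalizing cov with
  | nil => simp [bLoop]
  | cons n rest ih =>
      simp only [bLoop]
      by_cases hall : cov.all (fun p => p.2) = true
      · rw [if_pos hall]
        rw [List.all_eq_true] at hall
        conv_lhs => rw [show cov = cov.map (fun p => (p.1, p.2)) by simp]
        exact List.map_congr_left (fun p hp => by simp [hall p hp])
      · rw [if_neg hall, ih, bStep, List.map_map]
        refine List.map_congr_left (fun p _ => ?_)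
        by_cases h2 : p.2 <;> simp [h2]

-- A's fold over the twelve distinct module names appends fresh keys
lemma coverage_items (f : String → Bool) :
    (ZIG_MODULES.foldl (fun cov mod => cov.insert mod (f mod)) PySem.Dict.empty).items
      = ZIG_MODULES.map (fun mod => (mod, f mod)) := by
  have h := PySem.Dict.items_foldl_insert_fresh (l := ZIG_MODULES) (d := PySem.Dict.empty)
      (k := fun m => m) (v := f) (fun a _ => by simp [PySem.Dict.contains_empty]) (by decide)
  simpa using h

-- ===== VERDICT (by name: the statement is the Claim_ definition above) =====
theorem check_zig_coverage_spec : Claim_equal_check_zig_coverage := by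
  intro all_decls _
  unfold Spec_check_zig_coverage check_zig_coverage check_zig_coverage_alt
  rw [coverage_items, bLoop_eq, List.map_map]
  refine List.map_congr_left (fun mod _ => ?_)
  simp only [Bool.false_or, Function.comp]
  congr 1
  exact any_eq_of_mem_iff
    (fun x => by rw [mem_foldl_union]; simp [PySem.Set.empty]) _
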